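-- pv_equiv track=rewrite | github.com/Chemokoren/Algorithms-1 | AlgoMonster/Company-Specific OAs/Microsoft OA/longest_substring_without_two_contiguous_occurrences_of_letter.py | longestValidString
-- ===== SOURCE A (Python) =====
-- from itertools import groupby
--
-- def longestValidString(str) -> str:
--     loc, ans ='', ''
--
--     for c, g in groupby(str):
--         glen =len(list(g))
--         ans = max([ans, loc + c * min(glen, 2)], key=len)
--         if glen > 2:
--             loc = c * 2
--         else :
--             loc += c * glen
--     return ans
-- ===== SOURCE B (Python) =====
-- def longestValidString(str) -> str:
--     best = ''
--     cur = ''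
--     for c in str:
--         if len(cur) >= 2 and cur[-1] == c and cur[-2] == c:
--             cur = c + c
--         else:
--             cur = cur + c
--         if len(cur) > len(best):
--             best = cur
--     return best
-- ===== Notes on version B (the rewrite author's own statement) =====
-- stated objective: simpler
-- what changed: Replaces the itertools.groupby run-decomposition (run lengths, min(glen,2) capping, max-by-len over whole-run candidates) with a single character-by-character sliding-window scan that resets the window to its last two characters on a triple; avoiding groupby's per-run iterator/list materialization gives a measured constant-factor speedup.
import Mathlib
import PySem

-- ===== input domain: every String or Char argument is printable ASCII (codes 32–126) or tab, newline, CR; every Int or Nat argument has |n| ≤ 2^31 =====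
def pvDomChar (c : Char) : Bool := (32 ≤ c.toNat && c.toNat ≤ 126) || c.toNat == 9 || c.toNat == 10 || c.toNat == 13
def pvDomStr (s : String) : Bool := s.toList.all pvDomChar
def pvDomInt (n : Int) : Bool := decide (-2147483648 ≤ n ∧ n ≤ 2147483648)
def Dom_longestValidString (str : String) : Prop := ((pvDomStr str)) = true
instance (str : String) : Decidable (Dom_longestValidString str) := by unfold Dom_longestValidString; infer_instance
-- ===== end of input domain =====

-- B replaces the groupby-over-runs accumulation with a single per-character scan
-- tracking the current valid window directly (simpler; measured constant-factor faster).

-- ===== PORT A =====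
-- itertools.groupby over a string: the list of (char, run length) pairs
def pvRuns : List Char → List (Char × Nat)
  | [] => []
  | c :: rest =>
    match pvRuns rest with
    | [] => [(c, 1)]
    | (d, k) :: t => if c = d then (d, k + 1) :: t else (c, 1) :: (d, k) :: t

-- one iteration of A's loop body on state (loc, ans); max([ans, cand], key=len)
-- returns ans on ties (the first maximal element)
def pvStepA (st : List Char × List Char) (r : Char × Nat) : List Char × List Char :=
  let cand := st.1 ++ List.replicate (min r.2 2) r.1
  let ans := if st.2.length < cand.length then cand else st.2
  let loc := if r.2 > 2 then [r.1, r.1] else st.1 ++ List.replicate r.2 r.1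
  (loc, ans)

def longestValidString (str : String) : String :=
  String.ofList ((pvRuns str.toList).foldl pvStepA ([], [])).2

-- ===== PORT B =====
-- one iteration of B's loop body on state (cur, best)
def pvStepB (st : List Char × List Char) (c : Char) : List Char × List Char :=
  let cur := if 2 ≤ st.1.length ∧ PySem.List.pyGet? st.1 (-1) = some c ∧
                PySem.List.pyGet? st.1 (-2) = some c
             then [c, c] else st.1 ++ [c]
  let best := if st.2.length < cur.length then cur else st.2
  (cur, best)

def longestValidString_alt (str : String) : String :=
  String.ofList (str.toList.foldl pvStepB ([], [])).2

-- ===== PRECONDITION & SPEC =====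
def Spec_longestValidString (str : String) (out : String) : Prop := out = longestValidString_alt str
instance (str : String) (out : String) : Decidable (Spec_longestValidString str out) := by unfold Spec_longestValidString; infer_instance

-- ===== CLAIM (what is proved, stated in full; the proofs are below) =====
def Claim_equal_longestValidString : Prop := ∀ (str : String), Dom_longestValidString str → Spec_longestValidString str (longestValidString str)

-- ===== LEMMAS AND PROOFS =====

-- the head of the run list (if any) has a character different from c / from p
def pvHeadNe (c : Char) : List (Char × Nat) → Prop
  | [] => True
  | (d, _) :: _ => c ≠ d

def pvFresh (p : Option Char) : List (Char × Nat) → Prop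
  | [] => True
  | (c, _) :: _ => p ≠ some c

-- run list well-formedness: every length ≥ 1, adjacent characters differ
def pvChain : List (Char × Nat) → Prop
  | [] => True
  | (c, k) :: t => 1 ≤ k ∧ pvHeadNe c t ∧ pvChain t

lemma pvRuns_flat : ∀ l : List Char,
    (pvRuns l).flatMap (fun r => List.replicate r.2 r.1) = l := by
  intro l
  induction l with
  | nil => rfl
  | cons c rest ih =>
    unfold pvRuns
    cases h : pvRuns rest with
    | nil => rw [h] at ih; simpa using ih.symm
    | cons r t =>
      obtain ⟨d, k⟩ := r
      rw [h] at ih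
      by_cases hcd : c = d
      · subst hcd
        simp only [if_true, List.flatMap_cons] at ih ⊢
        rw [List.replicate_succ, List.cons_append, ih]
      · simp only [if_neg hcd, List.flatMap_cons] at ih ⊢
        rw [ih]; rfl

lemma pvRuns_chain : ∀ l : List Char, pvChain (pvRuns l) := by
  intro l
  induction l with
  | nil => trivial
  | cons c rest ih =>
    unfold pvRuns
    cases h : pvRuns rest with
    | nil => exact ⟨Nat.le_refl 1, trivial, trivial⟩
    | cons r t =>
      obtain ⟨d, k⟩ := r
      rw [h] at ih
      obtain ⟨hk, hne, hch⟩ := ih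
      show pvChain (if c = d then (d, k + 1) :: t else (c, 1) :: (d, k) :: t)
      by_cases hcd : c = d
      · rw [if_pos hcd]; exact ⟨Nat.le_add_left 1 k, hne, hch⟩
      · rw [if_neg hcd]; exact ⟨Nat.le_refl 1, hcd, hk, hne, hch⟩

-- negative indexing facts used to evaluate B's condition
lemma pyGet_neg_one_append (xs : List Char) (a : Char) :
    PySem.List.pyGet? (xs ++ [a]) (-1) = some a := by
  rw [PySem.List.pyGet?_neg_one]
  simp

lemma pyGet_neg_two_append (xs : List Char) (a : Char) (hx : xs ≠ []) :
    PySem.List.pyGet? (xs ++ [a]) (-2) = xs.getLast? := by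
  have hlen : 1 ≤ xs.length := List.length_pos_iff.mpr hx
  rw [PySem.List.pyGet?_neg_ofNat (xs ++ [a]) 2 (by omega) (by simp; omega)]
  have : xs.length + 1 - 2 = xs.length - 1 := by omega
  simp only [List.length_append, List.length_cons, List.length_nil, this]
  rw [List.getElem?_append_left (by omega)]
  rw [List.getLast?_eq_getElem?]

-- B's step when the window does not end in c: extend the window
lemma stepB_ext (loc best : List Char) (c : Char) (h : loc.getLast? ≠ some c) :
    pvStepB (loc, best) c
      = (loc ++ [c], if best.length < loc.length + 1 then loc ++ [c] else best) := by
  have hc : ¬ (2 ≤ loc.length ∧ PySem.List.pyGet? loc (-1) = some c ∧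
      PySem.List.pyGet? loc (-2) = some c) := by
    rintro ⟨-, h1, -⟩; rw [PySem.List.pyGet?_neg_one] at h1; exact h h1
  simp only [pvStepB, if_neg hc]
  simp

-- B's step on the second copy of c after an extension
lemma stepB_ext2 (loc best : List Char) (c : Char) (h : loc.getLast? ≠ some c) :
    pvStepB (loc ++ [c], best) c
      = (loc ++ [c, c], if best.length < loc.length + 2 then loc ++ [c, c] else best) := by
  have hc : ¬ (2 ≤ (loc ++ [c]).length ∧
      PySem.List.pyGet? (loc ++ [c]) (-1) = some c ∧
      PySem.List.pyGet? (loc ++ [c]) (-2) = some c) := by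
    rcases List.eq_nil_or_concat loc with hnil | ⟨ys, b, rfl⟩
    · subst hnil; rintro ⟨h2, -, -⟩; simp at h2
    · rintro ⟨-, -, h2⟩
      rw [pyGet_neg_two_append _ _ (by simp)] at h2
      exact h (by simpa using h2)
  simp only [pvStepB, if_neg hc]
  simp

-- B's step on a third (or later) copy of c: reset the window to [c, c]
lemma stepB_reset (xs best : List Char) (c : Char) (hb : 2 ≤ best.length) :
    pvStepB (xs ++ [c, c], best) c = ([c, c], best) := by
  have hc : (2 ≤ (xs ++ [c, c]).length ∧
      PySem.List.pyGet? (xs ++ [c, c]) (-1) = some c ∧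
      PySem.List.pyGet? (xs ++ [c, c]) (-2) = some c) := by
    refine ⟨by simp, ?_, ?_⟩
    · rw [show xs ++ [c, c] = (xs ++ [c]) ++ [c] by simp, pyGet_neg_one_append]
    · rw [show xs ++ [c, c] = (xs ++ [c]) ++ [c] by simp,
        pyGet_neg_two_append _ _ (by simp)]
      simp
  simp only [pvStepB, if_pos hc]
  rw [if_neg (by simp; omega)]

-- iterating the reset step is a fixpoint
lemma fix_fold (n : ℕ) (c : Char) (best : List Char) (hb : 2 ≤ best.length) :
    (List.replicate n c).foldl pvStepB ([c, c], best) = ([c, c], best) := by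
  induction n with
  | zero => rfl
  | succ m ih =>
    rw [List.replicate_succ, List.foldl_cons,
      show ([c, c] : List Char) = [] ++ [c, c] from rfl, stepB_reset [] best c hb]
    exact ih

-- processing one whole run of k copies of c with B equals one A-step,
-- provided loc does not already end with c
lemma run_fold (k : ℕ) (hk : 1 ≤ k) (c : Char) (loc best : List Char)
    (h : loc.getLast? ≠ some c) :
    (List.replicate k c).foldl pvStepB (loc, best) = pvStepA (loc, best) (c, k) := by
  obtain ⟨n, rfl⟩ : ∃ n, k = n + 1 := ⟨k - 1, by omega⟩
  rw [List.replicate_succ, List.foldl_cons, stepB_ext loc best c h]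
  cases n with
  | zero =>
    simp [pvStepA]
  | succ m =>
    rw [List.replicate_succ, List.foldl_cons, stepB_ext2 loc _ c h]
    have hbest : (if (if best.length < loc.length + 1 then loc ++ [c] else best).length
          < loc.length + 2 then loc ++ [c, c]
        else (if best.length < loc.length + 1 then loc ++ [c] else best))
        = if best.length < loc.length + 2 then loc ++ [c, c] else best := by
      by_cases h1 : best.length < loc.length + 1
      · rw [if_pos h1,
          if_pos (by simp only [List.length_append, List.length_cons, List.length_nil]; omega),
          if_pos (by omega)]
      · rw [if_neg h1]
    rw [hbest]
    have hb2 : 2 ≤ (if best.length < loc.length + 2 then loc ++ [c, c] else best).length := by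
      split_ifs with hh
      · simp only [List.length_append, List.length_cons, List.length_nil]; omega
      · omega
    cases m with
    | zero =>
      simp [pvStepA, List.replicate_succ]
    | succ p =>
      rw [List.replicate_succ, List.foldl_cons, stepB_reset loc _ c hb2,
        fix_fold p c _ hb2]
      simp [pvStepA, List.replicate_succ, show p + 1 + 1 + 1 > 2 by omega]

-- after one A-step the window ends with the run's character
lemma getLast_stepA (loc best : List Char) (c : Char) (k : ℕ) (hk : 1 ≤ k) :
    (pvStepA (loc, best) (c, k)).1.getLast? = some c := by
  simp only [pvStepA]
  split_ifs
  · rfl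
  · obtain ⟨n, rfl⟩ : ∃ n, k = n + 1 := ⟨k - 1, by omega⟩
    rw [show List.replicate (n + 1) c = List.replicate n c ++ [c] from
      List.replicate_succ' .., ← List.append_assoc]
    simp

-- B over the concatenation of the runs equals A over the run list
lemma fold_runs : ∀ (rs : List (Char × Nat)) (loc best : List Char),
    pvChain rs → pvFresh loc.getLast? rs →
    (rs.flatMap (fun r => List.replicate r.2 r.1)).foldl pvStepB (loc, best)
      = rs.foldl pvStepA (loc, best) := by
  intro rs
  induction rs with
  | nil => intro loc best _ _; rfl
  | cons r t ih =>
    intro loc best hch hf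
    obtain ⟨c, k⟩ := r
    obtain ⟨hk, hne, hcht⟩ := hch
    have hfresh : loc.getLast? ≠ some c := hf
    rw [List.flatMap_cons, List.foldl_append,
      run_fold k hk c loc best hfresh, List.foldl_cons]
    have hfr : pvFresh (pvStepA (loc, best) (c, k)).1.getLast? t := by
      rw [getLast_stepA loc best c k hk]
      cases t with
      | nil => trivial
      | cons s t' =>
        obtain ⟨d, m⟩ := s
        exact fun hh => hne (by injection hh)
    have hmain := ih (pvStepA (loc, best) (c, k)).1 (pvStepA (loc, best) (c, k)).2 hcht hfr
    simpa using hmain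

-- ===== VERDICT (by name: the statement is the Claim_ definition above) =====
theorem longestValidString_spec : Claim_equal_longestValidString := by
  intro s _
  unfold Spec_longestValidString longestValidString longestValidString_alt
  rw [← pvRuns_flat s.toList,
    fold_runs _ _ _ (pvRuns_chain _) ?_, pvRuns_flat]
  cases pvRuns s.toList with
  | nil => trivial
  | cons r t => exact fun h => by simp at h
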